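-- pv_equiv track=rewrite | github.com/dotzo/AdventOfCode2019 | Day4.py | meetsCriteria
-- ===== SOURCE A (Python) =====
-- def meetsCriteria(n):
--     s = list(map(int,str(n)))
--     countAdjs = [0]*10
--     hasMonotone = True
--     for d in range(len(s)-1):
--         a = s[d]
--         b = s[d+1]
--         countAdjs[a] += 1 if (a == b) else 0
--         hasMonotone = hasMonotone and (a <= b)
--
--
--
--     return any(filter(lambda x: x == 1, countAdjs)) and hasMonotone
-- ===== SOURCE B (Python) =====
-- def meetsCriteria(n):
--     s = list(map(int, str(n)))
--     monotone = all(a <= b for a, b in zip(s, s[1:]))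
--     has_double = any(s.count(d) == 2 for d in s)
--     return has_double and monotone
-- ===== Notes on version B (the rewrite author's own statement) =====
-- stated objective: simpler
-- what changed: Replaces A's ten-slot adjacent-pair histogram updated in an index loop by a zip-based monotonicity check plus a per-digit occurrence count (in a monotone number a digit occurs exactly twice iff it forms exactly one adjacent pair), removing the mutable counter array and index arithmetic.
import Mathlib
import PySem

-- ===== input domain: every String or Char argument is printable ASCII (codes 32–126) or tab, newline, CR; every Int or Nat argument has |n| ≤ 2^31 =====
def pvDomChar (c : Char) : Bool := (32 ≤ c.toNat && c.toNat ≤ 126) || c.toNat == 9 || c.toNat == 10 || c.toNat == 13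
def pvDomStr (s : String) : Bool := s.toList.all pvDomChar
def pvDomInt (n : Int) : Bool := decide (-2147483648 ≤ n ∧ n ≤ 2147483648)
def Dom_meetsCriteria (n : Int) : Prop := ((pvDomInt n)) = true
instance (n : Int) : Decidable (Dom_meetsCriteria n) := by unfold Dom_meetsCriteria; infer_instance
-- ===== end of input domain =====

-- B replaces A's ten-slot adjacent-pair histogram loop by a zip monotonicity check
-- plus a per-digit occurrence count (objective: simpler).

-- shared Python line 's = list(map(int, str(n)))': int() on each one-char string of str(n);
-- the .getD 0 arm is unreachable under Pre_ (int() raises ValueError only for n < 0, on '-')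
def digitsOf (n : Int) : List Int :=
  (PySem.Int.toChars n).map (fun c => (PySem.Int.ofChars? [c]).getD 0)

-- ===== PORT A =====
-- the for-loop over d in range(len(s)-1): structural recursion over consecutive pairs,
-- same state (countAdjs, hasMonotone); 'countAdjs[a] += 1 if a == b else 0'
def loopA : List Int → List Int → Bool → List Int × Bool
  | a :: b :: rest, cnt, mono =>
      loopA (b :: rest)
        (if a == b then cnt.set a.toNat (cnt.getD a.toNat 0 + 1) else cnt)
        (mono && decide (a ≤ b))
  | _, cnt, mono => (cnt, mono)

def meetsCriteria (n : Int) : Bool :=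
  let s := digitsOf n
  let r := loopA s (List.replicate 10 0) true
  -- any(filter(lambda x: x == 1, countAdjs)) and hasMonotone
  (r.1.any (fun x => x == 1)) && r.2

-- ===== PORT B =====
def meetsCriteria_alt (n : Int) : Bool :=
  let s := digitsOf n
  -- all(a <= b for a, b in zip(s, s[1:]))   (s[1:] = s.tail, PySem.List.slice_from_one)
  let monotone := (s.zip s.tail).all (fun p => decide (p.1 ≤ p.2))
  -- any(s.count(d) == 2 for d in s)
  let hasDouble := s.any (fun d => PySem.List.count s d == 2)
  hasDouble && monotone

-- ===== PRECONDITION & SPEC =====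
-- Pre_ excludes exactly n < 0, on which str(n) starts with '-' and int('-') raises ValueError in A (and in B).
def Pre_meetsCriteria (n : Int) : Prop := 0 ≤ n
instance (n : Int) : Decidable (Pre_meetsCriteria n) := by unfold Pre_meetsCriteria; infer_instance
def pvWitness_meetsCriteria : Int := (112233)

def Spec_meetsCriteria (n : Int) (out : Bool) : Prop := out = meetsCriteria_alt n
instance (n : Int) (out : Bool) : Decidable (Spec_meetsCriteria n out) := by unfold Spec_meetsCriteria; infer_instance

-- ===== CLAIM (what is proved, stated in full; the proofs are below) =====
def Claim_equal_meetsCriteria : Prop := ∀ (n : Int), Dom_meetsCriteria n → Pre_meetsCriteria n → Spec_meetsCriteria n (meetsCriteria n)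

-- ===== LEMMAS AND PROOFS =====

-- number of adjacent equal pairs of value i in s
def pairCnt (i : Int) : List Int → Int
  | a :: b :: rest => (if a = b ∧ a = i then 1 else 0) + pairCnt i (b :: rest)
  | _ => 0

theorem loopA_snd (s : List Int) (cnt : List Int) (mono : Bool) :
    (loopA s cnt mono).2 = (mono && (s.zip s.tail).all (fun p => decide (p.1 ≤ p.2))) := by
  induction s generalizing cnt mono with
  | nil => simp [loopA]
  | cons a t ih =>
    cases t with
    | nil => simp [loopA]
    | cons b rest =>
      rw [loopA, ih]
      simp [Bool.and_assoc]

theorem loopA_len (s : List Int) (cnt : List Int) (mono : Bool) :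
    (loopA s cnt mono).1.length = cnt.length := by
  induction s generalizing cnt mono with
  | nil => simp [loopA]
  | cons a t ih =>
    cases t with
    | nil => simp [loopA]
    | cons b rest =>
      rw [loopA, ih]
      split <;> simp

theorem loopA_getD (s : List Int) (cnt : List Int) (mono : Bool)
    (hlen : cnt.length = 10) (hd : ∀ d ∈ s, 0 ≤ d ∧ d < 10) (k : Nat) (hk : k < 10) :
    (loopA s cnt mono).1.getD k 0 = cnt.getD k 0 + pairCnt (k : Int) s := by
  induction s generalizing cnt mono with
  | nil => simp [loopA, pairCnt]
  | cons a t ih =>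
    cases t with
    | nil => simp [loopA, pairCnt]
    | cons b rest =>
      obtain ⟨ha0, ha10⟩ := hd a (by simp)
      rw [loopA, ih _ _ (by split <;> simp [hlen])
            (fun d hdm => hd d (by simp at hdm ⊢; tauto)) ]
      have hset : ((if a == b then cnt.set a.toNat (cnt.getD a.toNat 0 + 1) else cnt).getD k 0)
          = cnt.getD k 0 + (if a = b ∧ a = (k : Int) then 1 else 0) := by
        by_cases hab : a = b
        · rw [if_pos (by simpa using hab)]
          by_cases hak : a = (k : Int)
          · have hkn : a.toNat = k := by omega
            have hklen : k < cnt.length := by omega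
            rw [if_pos ⟨hab, hak⟩, hkn]
            simp [List.getD, hklen]
          · have hkn : a.toNat ≠ k := by omega
            rw [if_neg (by tauto)]
            simp [List.getD, List.getElem?_set_ne hkn]
        · rw [if_neg (by simpa using hab), if_neg (by tauto)]
          simp
      rw [hset, pairCnt]
      ring

theorem pairCnt_of_not_mem (x : Int) (s : List Int) (hx : x ∉ s) : pairCnt x s = 0 := by
  induction s with
  | nil => rfl
  | cons a t ih =>
    cases t with
    | nil => rfl
    | cons b rest =>
      rw [pairCnt]
      have hxa : x ≠ a := by intro h; exact hx (by simp [h])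
      have hno : ¬ (a = b ∧ a = x) := by rintro ⟨_, h⟩; exact hxa h.symm
      rw [if_neg hno, ih (by intro h; exact hx (List.mem_cons_of_mem _ h))]
      simp

theorem pairCnt_sorted (x : Int) (s : List Int) (hs : List.Pairwise (· ≤ ·) s)
    (hx : x ∈ s) : pairCnt x s = (s.count x : Int) - 1 := by
  induction s with
  | nil => simp at hx
  | cons a t ih =>
    cases t with
    | nil =>
      simp at hx
      simp [pairCnt, hx]
    | cons b rest =>
      rw [pairCnt]
      rw [List.pairwise_cons] at hs
      obtain ⟨hale, hs'⟩ := hs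
      by_cases hxa : x = a
      · subst hxa
        by_cases hab : x = b
        · have hmem : x ∈ b :: rest := by simp [hab]
          rw [if_pos ⟨hab, rfl⟩, ih hs' hmem]
          have h1 : (x :: b :: rest).count x = (b :: rest).count x + 1 := by
            simp [List.count_cons]
          rw [h1]
          push_cast
          ring
        · have hnm : x ∉ b :: rest := by
            intro hmem
            rcases List.mem_cons.mp hmem with h | h
            · exact hab h
            · have h1 : x ≤ b := hale b (by simp)
              have h2 : b ≤ x := (List.pairwise_cons.mp hs').1 x h
              exact hab (le_antisymm h1 h2)
          have hno : ¬ (x = b ∧ x = x) := by rintro ⟨h, _⟩; exact hab h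
          rw [if_neg hno, pairCnt_of_not_mem x _ hnm]
          have h0 : (b :: rest).count x = 0 := List.count_eq_zero.mpr hnm
          have h1 : (x :: b :: rest).count x = (b :: rest).count x + 1 := by
            simp [List.count_cons]
          rw [h1, h0]
          simp
      · have hmem : x ∈ b :: rest := by
          rcases List.mem_cons.mp hx with h | h
          · exact absurd h hxa
          · exact h
        have hno : ¬ (a = b ∧ a = x) := by rintro ⟨_, h⟩; exact hxa h.symm
        have hax : ¬ a = x := fun h => hxa h.symm
        rw [if_neg hno, ih hs' hmem]
        have h1 : (a :: b :: rest).count x = (b :: rest).count x := by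
          simp [List.count_cons, hax]
        rw [h1]
        simp

theorem zip_all_imp_pairwise (s : List Int)
    (h : (s.zip s.tail).all (fun p => decide (p.1 ≤ p.2)) = true) :
    List.Pairwise (· ≤ ·) s := by
  induction s with
  | nil => simp
  | cons a t ih =>
    cases t with
    | nil => simp
    | cons b rest =>
      simp only [List.tail_cons, List.zip_cons_cons, List.all_cons, Bool.and_eq_true,
        decide_eq_true_eq] at h
      have hp : List.Pairwise (· ≤ ·) (b :: rest) := ih (by simpa using h.2)
      refine List.pairwise_cons.mpr ⟨?_, hp⟩
      intro y hy
      rcases List.mem_cons.mp hy with rfl | hy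
      · exact h.1
      · exact le_trans h.1 ((List.pairwise_cons.mp hp).1 y hy)

-- the final counter list of A, as a pure map over range 10
theorem loopA_fst (s : List Int) (hd : ∀ d ∈ s, 0 ≤ d ∧ d < 10) :
    (loopA s (List.replicate 10 0) true).1
      = (List.range 10).map (fun k : Nat => pairCnt (k : Int) s) := by
  apply List.ext_getElem
  · rw [loopA_len]; simp
  · intro k hk1 hk2
    have hk : k < 10 := by rw [loopA_len] at hk1; simpa using hk1
    have hgd := loopA_getD s (List.replicate 10 0) true (by simp) hd k hk
    rw [List.getD_eq_getElem _ _ (by rw [loopA_len]; simpa),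
        List.getD_eq_getElem _ _ (by simpa)] at hgd
    simp only [List.getElem_replicate, zero_add] at hgd
    simp only [List.getElem_map, List.getElem_range]
    exact hgd

-- core equivalence on a sorted digit list: "some slot counts exactly 1" = "some digit occurs exactly twice"
theorem core (s : List Int) (hd : ∀ d ∈ s, 0 ≤ d ∧ d < 10)
    (hmono : (s.zip s.tail).all (fun p => decide (p.1 ≤ p.2)) = true) :
    (((List.range 10).map fun k : Nat => pairCnt (k : Int) s).any (fun x => x == 1))
      = s.any (fun d => PySem.List.count s d == 2) := by
  have hs : List.Pairwise (· ≤ ·) s := zip_all_imp_pairwise s hmono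
  simp only [PySem.List.count_eq]
  rw [Bool.eq_iff_iff, List.any_map, List.any_eq_true, List.any_eq_true]
  constructor
  · rintro ⟨k, hk, hpk⟩
    simp only [Function.comp, beq_iff_eq] at hpk
    have hmem : (k : Int) ∈ s := by
      by_contra hnm
      rw [pairCnt_of_not_mem _ _ hnm] at hpk
      exact one_ne_zero hpk.symm
    refine ⟨(k : Int), hmem, ?_⟩
    have := pairCnt_sorted _ s hs hmem
    rw [this] at hpk
    have : s.count (k : Int) = 2 := by omega
    simp [this]
  · rintro ⟨d, hdm, hcnt⟩
    simp only [beq_iff_eq] at hcnt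
    obtain ⟨hd0, hd10⟩ := hd d hdm
    refine ⟨d.toNat, by simp [List.mem_range]; omega, ?_⟩
    have hdc : ((d.toNat : Int)) = d := by omega
    simp only [Function.comp, hdc, beq_iff_eq]
    rw [pairCnt_sorted d s hs hdm, hcnt]
    norm_num

-- every char of str(n) for 0 ≤ n is a base-10 digit char
theorem mem_toDigitsCore (fuel n : Nat) (ds : List Char) (c : Char)
    (hc : c ∈ Nat.toDigitsCore 10 fuel n ds) :
    (∃ k, k < 10 ∧ c = Nat.digitChar k) ∨ c ∈ ds := by
  induction fuel generalizing n ds with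
  | zero => exact Or.inr hc
  | succ fuel ih =>
    rw [Nat.toDigitsCore] at hc
    by_cases h : n / 10 = 0
    · rw [if_pos h] at hc
      rcases List.mem_cons.mp hc with h' | h'
      · exact Or.inl ⟨n % 10, Nat.mod_lt _ (by norm_num), h'⟩
      · exact Or.inr h'
    · rw [if_neg h] at hc
      rcases ih (n / 10) _ hc with h' | h'
      · exact Or.inl h'
      · rcases List.mem_cons.mp h' with h'' | h''
        · exact Or.inl ⟨n % 10, Nat.mod_lt _ (by norm_num), h''⟩
        · exact Or.inr h''

theorem parse_digitChar : ∀ k, k < 10 → (PySem.Int.ofChars? [Nat.digitChar k]).getD 0 = (k : Int) := by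
  decide

theorem digitsOf_range (n : Int) (hn : 0 ≤ n) : ∀ d ∈ digitsOf n, 0 ≤ d ∧ d < 10 := by
  intro d hdm
  unfold digitsOf at hdm
  rw [List.mem_map] at hdm
  obtain ⟨c, hc, hval⟩ := hdm
  have hpos : ¬ (n < 0) := by omega
  rw [PySem.Int.toChars, if_neg hpos] at hc
  rcases mem_toDigitsCore _ _ _ _ hc with ⟨k, hk, rfl⟩ | h
  · rw [parse_digitChar k hk] at hval
    omega
  · simp at h

theorem main_eq (s : List Int) (hd : ∀ d ∈ s, 0 ≤ d ∧ d < 10) :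
    (((loopA s (List.replicate 10 0) true).1.any (fun x => x == 1))
        && (loopA s (List.replicate 10 0) true).2)
      = ((s.any (fun d => PySem.List.count s d == 2))
        && ((s.zip s.tail).all (fun p => decide (p.1 ≤ p.2)))) := by
  rw [loopA_snd, loopA_fst s hd, Bool.true_and]
  by_cases hm : (s.zip s.tail).all (fun p => decide (p.1 ≤ p.2)) = true
  · rw [core s hd hm]
  · simp only [Bool.not_eq_true] at hm
    rw [hm, Bool.and_false, Bool.and_false]

-- ===== VERDICT (by name: the statement is the Claim_ definition above) =====
theorem meetsCriteria_spec : Claim_equal_meetsCriteria := by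
  intro n _ hpre
  unfold Spec_meetsCriteria meetsCriteria meetsCriteria_alt
  exact main_eq (digitsOf n) (digitsOf_range n hpre)
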